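-- pv_equiv track=rewrite | github.com/digispect-intel/nunc_perfect_cup_of_coffee | dataset.py | extract_flavor_profile
-- ===== SOURCE A (Python) =====
-- def extract_flavor_profile(review):
--     """Extract flavor profile categories from review text."""
--     if not isinstance(review, str):
--         return {}
--
--     review = review.lower()
--     flavor_categories = {
--         'fruity': ['berry', 'fruit', 'citrus', 'apple', 'cherry', 'lemon', 'orange',
--                   'peach', 'apricot', 'plum', 'mango', 'raspberry'],
--         'floral': ['floral', 'jasmine', 'rose', 'flower', 'lavender', 'honeysuckle', 'lilac'],
--         'nutty': ['nut', 'almond', 'hazelnut', 'walnut', 'peanut', 'cashew', 'pistachio'],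
--         'chocolaty': ['chocolate', 'cocoa', 'cacao', 'mocha', 'fudge'],
--         'spicy': ['spice', 'cinnamon', 'nutmeg', 'clove', 'pepper', 'peppercorn']
--     }
--
--     profile = {}
--     for category, keywords in flavor_categories.items():
--         profile[category] = any(keyword in review for keyword in keywords)
--
--     return profile
-- ===== SOURCE B (Python) =====
-- _KEYWORD_CATS = [
--     ('berry', 'fruity'), ('fruit', 'fruity'), ('citrus', 'fruity'), ('apple', 'fruity'),
--     ('cherry', 'fruity'), ('lemon', 'fruity'), ('orange', 'fruity'), ('peach', 'fruity'),
--     ('apricot', 'fruity'), ('plum', 'fruity'), ('mango', 'fruity'), ('raspberry', 'fruity'),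
--     ('floral', 'floral'), ('jasmine', 'floral'), ('rose', 'floral'), ('flower', 'floral'),
--     ('lavender', 'floral'), ('honeysuckle', 'floral'), ('lilac', 'floral'),
--     ('nut', 'nutty'), ('almond', 'nutty'), ('hazelnut', 'nutty'), ('walnut', 'nutty'),
--     ('peanut', 'nutty'), ('cashew', 'nutty'), ('pistachio', 'nutty'),
--     ('chocolate', 'chocolaty'), ('cocoa', 'chocolaty'), ('cacao', 'chocolaty'),
--     ('mocha', 'chocolaty'), ('fudge', 'chocolaty'),
--     ('spice', 'spicy'), ('cinnamon', 'spicy'), ('nutmeg', 'spicy'),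
--     ('clove', 'spicy'), ('pepper', 'spicy'), ('peppercorn', 'spicy'),
-- ]
-- _CATEGORIES = ['fruity', 'floral', 'nutty', 'chocolaty', 'spicy']
--
--
-- def extract_flavor_profile(review):
--     """Extract flavor profile categories from review text."""
--     if not isinstance(review, str):
--         return {}
--     text = review.lower()
--     profile = dict.fromkeys(_CATEGORIES, False)
--     # Sliding-window scan: walk the text once position by position and test, at
--     # each position, which keywords start there -- no substring search at all.
--     for i in range(len(text)):
--         for kw, cat in _KEYWORD_CATS:
--             if text.startswith(kw, i):
--                 profile[cat] = True
--     return profile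
-- ===== Notes on version B (the rewrite author's own statement) =====
-- stated objective: alternative
-- what changed: Replaces the per-category substring-membership tests (any(kw in review) over a dict of keyword lists) with a positional sliding-window scan: pre-seed all five categories False, walk the lowered text index by index, and at each index mark the category of every keyword that starts there via startswith(kw, i).
import Mathlib
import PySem

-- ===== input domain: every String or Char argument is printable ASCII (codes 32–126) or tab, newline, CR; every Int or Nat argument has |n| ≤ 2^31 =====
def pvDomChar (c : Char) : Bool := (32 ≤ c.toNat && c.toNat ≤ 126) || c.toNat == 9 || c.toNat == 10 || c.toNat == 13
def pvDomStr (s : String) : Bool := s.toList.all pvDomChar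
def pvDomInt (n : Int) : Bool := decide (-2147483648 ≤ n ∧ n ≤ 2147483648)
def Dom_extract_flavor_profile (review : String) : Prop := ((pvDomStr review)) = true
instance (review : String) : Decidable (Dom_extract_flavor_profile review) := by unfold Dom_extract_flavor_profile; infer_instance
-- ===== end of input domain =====

-- B replaces A's per-category substring-membership tests (any(kw in review)) by a positional
-- sliding-window scan: seed all five categories False, then walk the lowered text index by index,
-- marking the category of every keyword that starts at that index (alternative algorithm).


-- ===== PORT A =====
def pvFlavorCategories : List (String × List String) :=
  [("fruity", ["berry", "fruit", "citrus", "apple", "cherry", "lemon", "orange",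
               "peach", "apricot", "plum", "mango", "raspberry"]),
   ("floral", ["floral", "jasmine", "rose", "flower", "lavender", "honeysuckle", "lilac"]),
   ("nutty", ["nut", "almond", "hazelnut", "walnut", "peanut", "cashew", "pistachio"]),
   ("chocolaty", ["chocolate", "cocoa", "cacao", "mocha", "fudge"]),
   ("spicy", ["spice", "cinnamon", "nutmeg", "clove", "pepper", "peppercorn"])]

def extract_flavor_profile (review : String) : List (String × Bool) :=
  let r := PySem.Str.lower review
  (pvFlavorCategories.foldl
    (fun d q => PySem.Dict.insert d q.1 (q.2.any (fun kw => PySem.Str.isIn kw r)))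
    PySem.Dict.empty).items

-- ===== PORT B =====
def pvKeywordCats : List (String × String) :=
  [("berry", "fruity"), ("fruit", "fruity"), ("citrus", "fruity"), ("apple", "fruity"),
   ("cherry", "fruity"), ("lemon", "fruity"), ("orange", "fruity"), ("peach", "fruity"),
   ("apricot", "fruity"), ("plum", "fruity"), ("mango", "fruity"), ("raspberry", "fruity"),
   ("floral", "floral"), ("jasmine", "floral"), ("rose", "floral"), ("flower", "floral"),
   ("lavender", "floral"), ("honeysuckle", "floral"), ("lilac", "floral"),
   ("nut", "nutty"), ("almond", "nutty"), ("hazelnut", "nutty"), ("walnut", "nutty"),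
   ("peanut", "nutty"), ("cashew", "nutty"), ("pistachio", "nutty"),
   ("chocolate", "chocolaty"), ("cocoa", "chocolaty"), ("cacao", "chocolaty"),
   ("mocha", "chocolaty"), ("fudge", "chocolaty"),
   ("spice", "spicy"), ("cinnamon", "spicy"), ("nutmeg", "spicy"),
   ("clove", "spicy"), ("pepper", "spicy"), ("peppercorn", "spicy")]

def pvCategories : List String := ["fruity", "floral", "nutty", "chocolaty", "spicy"]

def extract_flavor_profile_alt (review : String) : List (String × Bool) :=
  let text := (PySem.Str.lower review).toList
  -- profile = dict.fromkeys(_CATEGORIES, False)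
  let profile0 : PySem.Dict String Bool :=
    pvCategories.foldl (fun d c => PySem.Dict.insert d c false) PySem.Dict.empty
  -- for i in range(len(text)): ...; text.startswith(kw, i) with 0 ≤ i < len(text)
  -- is exactly "kw is a prefix of text[i:]", ported as Chars.startswith (text.drop i) kw.
  let profile :=
    (PySem.List.pyRange 0 text.length).foldl
      (fun d i =>
        pvKeywordCats.foldl
          (fun d q =>
            if PySem.Chars.startswith (text.drop i.toNat) q.1.toList then
              PySem.Dict.insert d q.2 true
            else d) d)
      profile0
  profile.items

-- ===== PRECONDITION & SPEC =====
def Spec_extract_flavor_profile (review : String) (out : List (String × Bool)) : Prop := out = extract_flavor_profile_alt review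
instance (review : String) (out : List (String × Bool)) : Decidable (Spec_extract_flavor_profile review out) := by unfold Spec_extract_flavor_profile; infer_instance

-- ===== CLAIM =====
def Claim_equal_extract_flavor_profile : Prop := ∀ (review : String), Dom_extract_flavor_profile review → Spec_extract_flavor_profile review (extract_flavor_profile review)

-- ===== LEMMAS AND PROOFS =====

-- The profile dict, viewed as a function on the five fixed categories.
def pvMkP (f : String → Bool) : PySem.Dict String Bool :=
  PySem.Dict.mk (pvCategories.map (fun c => (c, f c)))

theorem pv_items (f : String → Bool) : (pvMkP f).items = pvCategories.map (fun c => (c, f c)) := rfl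

theorem pv_congr (f g : String → Bool) (h : ∀ c ∈ pvCategories, f c = g c) :
    pvMkP f = pvMkP g := by
  unfold pvMkP
  exact congrArg PySem.Dict.mk (List.map_congr_left (fun c hc => by rw [h c hc]))

theorem pv_insert (f : String → Bool) (cat : String) (hcat : cat ∈ pvCategories) :
    PySem.Dict.insert (pvMkP f) cat true = pvMkP (fun c => if c == cat then true else f c) := by
  have hcon : (pvMkP f).contains cat = true := by
    rw [PySem.Dict.contains_eq_decide_mem_keys]
    have : (pvMkP f).keys = pvCategories := by
      simp [pvMkP, PySem.Dict.keys, Function.comp_def]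
    rw [this]; simpa using hcat
  apply PySem.Dict.ext
  rw [PySem.Dict.items_insert_of_contains _ _ hcon, pv_items, pv_items, List.map_map]
  apply List.map_congr_left
  intro c _
  by_cases hc : c = cat
  · subst hc; simp
  · simp [hc, beq_eq_false_iff_ne.mpr hc]

-- One pass of B's inner keyword loop, on an abstract per-keyword test p.
theorem pv_inner (p : String → Bool) (L : List (String × String))
    (hL : ∀ q ∈ L, q.2 ∈ pvCategories) (f : String → Bool) :
    L.foldl (fun d q => if p q.1 then PySem.Dict.insert d q.2 true else d) (pvMkP f)
    = pvMkP (fun c => f c || L.any (fun q => p q.1 && q.2 == c)) := by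
  induction L generalizing f with
  | nil => simp
  | cons q L ih =>
    simp only [List.foldl_cons, List.any_cons]
    by_cases hp : p q.1
    · rw [if_pos hp, pv_insert f q.2 (hL q (by simp)),
        ih (fun q hq => hL q (by simp [hq]))]
      apply pv_congr
      intro c _
      by_cases hc : c = q.2
      · subst hc; simp [hp]
      · simp [hp, hc, beq_eq_false_iff_ne.mpr (fun h => hc h.symm)]
    · rw [if_neg hp, ih (fun q hq => hL q (by simp [hq]))]
      apply pv_congr
      intro c _
      simp [hp]

-- B's whole position loop, on an abstract per-position-per-keyword test p.
theorem pv_outer (p : Nat → String → Bool) (I : List Int) (f : String → Bool) :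
    I.foldl (fun d i =>
      pvKeywordCats.foldl
        (fun d q => if p i.toNat q.1 then PySem.Dict.insert d q.2 true else d) d) (pvMkP f)
    = pvMkP (fun c => f c ||
        I.any (fun i => pvKeywordCats.any (fun q => p i.toNat q.1 && q.2 == c))) := by
  induction I generalizing f with
  | nil => simp
  | cons i I ih =>
    simp only [List.foldl_cons, List.any_cons]
    rw [pv_inner _ _ (by decide), ih]
    apply pv_congr
    intro c _
    simp [Bool.or_assoc]

theorem pv_any_congr_mem {α : Type} (l : List α) (p q : α → Bool) (h : ∀ x ∈ l, p x = q x) :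
    l.any p = l.any q := by
  induction l with
  | nil => rfl
  | cons a l ih =>
    simp only [List.any_cons, h a (by simp), ih (fun x hx => h x (by simp [hx]))]

theorem pv_swap (I : List Int) (L : List (String × String)) (P : Int → String × String → Bool) :
    I.any (fun i => L.any (fun q => P i q)) = L.any (fun q => I.any (fun i => P i q)) := by
  rw [Bool.eq_iff_iff]
  simp only [List.any_eq_true]
  constructor <;> rintro ⟨x, hx, y, hy, h⟩ <;> exact ⟨y, hy, x, hx, h⟩

theorem pv_any_and_const (I : List Int) (f : Int → Bool) (b : Bool) :
    I.any (fun i => f i && b) = (I.any f && b) := by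
  cases b <;> simp

-- A sliding-window scan of a nonempty keyword over all start positions is substring membership.
theorem pv_scan_eq_isIn (text kw : List Char) (hkw : kw ≠ []) :
    (PySem.List.pyRange 0 text.length).any
      (fun i => PySem.Chars.startswith (text.drop i.toNat) kw)
    = PySem.Chars.isIn kw text := by
  rw [Bool.eq_iff_iff]
  simp only [List.any_eq_true, PySem.List.mem_pyRange_one, PySem.Chars.startswith_iff]
  rw [← PySem.Chars.exists_prefix_drop_iff_isIn]
  constructor
  · rintro ⟨i, ⟨h0, hlt⟩, hpfx⟩
    exact ⟨i.toNat, hpfx⟩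
  · rintro ⟨j, hpfx⟩
    have hj : j < text.length := by
      by_contra hge
      have : text.drop j = [] := List.drop_eq_nil_of_le (by omega)
      rw [this] at hpfx
      exact hkw (List.prefix_nil.mp hpfx)
    exact ⟨(j : Int), ⟨by positivity, by exact_mod_cast hj⟩, by simpa using hpfx⟩

-- B's full boolean for category c, turned into A's per-keyword membership form.
theorem pv_cat (text : List Char) (c : String) :
    (PySem.List.pyRange 0 text.length).any
      (fun i => pvKeywordCats.any
        (fun q => PySem.Chars.startswith (text.drop i.toNat) q.1.toList && q.2 == c))
    = pvKeywordCats.any (fun q => PySem.Chars.isIn q.1.toList text && q.2 == c) := by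
  rw [pv_swap]
  apply pv_any_congr_mem
  intro q hq
  have hne : q.1.toList ≠ [] := by
    revert hq
    have : ∀ q ∈ pvKeywordCats, q.1.toList ≠ [] := by decide
    exact this q
  rw [pv_any_and_const, pv_scan_eq_isIn text q.1.toList hne]

-- ===== VERDICT =====
theorem extract_flavor_profile_spec : Claim_equal_extract_flavor_profile := by
  intro review _
  unfold Spec_extract_flavor_profile extract_flavor_profile extract_flavor_profile_alt
  have h0 : pvCategories.foldl (fun d c => PySem.Dict.insert d c false) PySem.Dict.empty
      = pvMkP (fun _ => false) := by decide
  have hA : ∀ a1 a2 a3 a4 a5 : Bool,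
      (((((PySem.Dict.empty.insert "fruity" a1).insert "floral" a2).insert "nutty" a3).insert
          "chocolaty" a4).insert "spicy" a5).items
      = [("fruity", a1), ("floral", a2), ("nutty", a3), ("chocolaty", a4), ("spicy", a5)] := by
    decide
  simp only [pvFlavorCategories, List.foldl_cons, List.foldl_nil]
  rw [h0, pv_outer (fun n s => PySem.Chars.startswith
      (((PySem.Str.lower review).toList).drop n) s.toList), pv_items, hA]
  simp only [pvCategories, List.map_cons, List.map_nil, Bool.false_or]
  rw [pv_cat, pv_cat, pv_cat, pv_cat, pv_cat]
  simp [pvKeywordCats]
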